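-- pv_equiv track=rewrite | github.com/xiaoman-liu/datadrivenmaneuveridentification | utils/predict_utils.py | change_id_times
-- ===== SOURCE A (Python) =====
-- def change_id_times(feature_id):
--     # change the roadid into the times of changeroad
--     # featureid shape = ()
--
--     a = feature_id[0]
--     change_time = 0
--     for i in range(len(feature_id)):
--         if feature_id[i] != a:
--             change_time += 1
--             a = feature_id[i]
--         feature_id[i] = change_time
--
--     return feature_id
-- ===== SOURCE B (Python) =====
-- from itertools import accumulate
--
-- def change_id_times(feature_id):
--     # Staged vectorized rewrite: first a pass marking where adjacent values
--     # differ, then a prefix sum of those flags gives the change count at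
--     # each position; write the result back in place and return the list.
--     flags = [int(cur != prev) for prev, cur in zip(feature_id, feature_id[1:])]
--     feature_id[:] = accumulate(flags, initial=0)
--     return feature_id
-- ===== Notes on version B (the rewrite author's own statement) =====
-- stated objective: idiomatic
-- what changed: Replaced the stateful prev-value/change-counter scan with two staged passes: a pairwise comparison of the list with its shift producing 0/1 change flags, followed by a prefix sum (itertools.accumulate) of those flags.
import Mathlib
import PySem

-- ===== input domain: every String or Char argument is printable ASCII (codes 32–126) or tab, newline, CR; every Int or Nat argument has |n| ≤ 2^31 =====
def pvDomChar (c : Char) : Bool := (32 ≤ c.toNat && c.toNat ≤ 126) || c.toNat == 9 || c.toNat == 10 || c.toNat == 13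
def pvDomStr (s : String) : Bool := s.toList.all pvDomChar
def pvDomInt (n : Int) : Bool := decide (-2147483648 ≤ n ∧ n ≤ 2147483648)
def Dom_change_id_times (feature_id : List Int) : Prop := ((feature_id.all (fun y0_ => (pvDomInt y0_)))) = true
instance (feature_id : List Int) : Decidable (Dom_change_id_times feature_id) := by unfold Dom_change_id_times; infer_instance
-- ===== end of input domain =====

-- B replaces A's stateful change-counting scan by pairwise change flags plus a prefix sum;
-- both Pythons mutate feature_id in place and return it — the equivalence is about the return value.

-- ===== PORT A =====
-- A's index loop with state (a = previous value, change_time); writing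
-- feature_id[i] in place becomes emitting the written value at each position.
def change_id_times_loopA : List Int → Int → Int → List Int
  | [], _, _ => []
  | x :: xs, a, ct =>
    if x ≠ a then (ct + 1) :: change_id_times_loopA xs x (ct + 1)
    else ct :: change_id_times_loopA xs a ct

def change_id_times (feature_id : List Int) : List Int :=
  match feature_id with
  | [] => []   -- unreachable under Pre_: Python raises IndexError reading feature_id[0]
  | x :: xs => change_id_times_loopA (x :: xs) x 0

-- ===== PORT B =====
-- Source B: flags from zip(feature_id, feature_id[1:]), then accumulate(flags, initial=0)
-- (= List.scanl (·+·) 0: initial value followed by running sums).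
def change_id_times_alt (feature_id : List Int) : List Int :=
  let flags := (feature_id.zip (feature_id.drop 1)).map
    (fun p => if p.2 ≠ p.1 then (1 : Int) else 0)
  List.scanl (· + ·) 0 flags

-- ===== PRECONDITION & SPEC =====
-- Pre_ excludes only the empty list, on which A raises IndexError reading its first element.
def Pre_change_id_times (feature_id : List Int) : Prop := feature_id ≠ []
instance (feature_id : List Int) : Decidable (Pre_change_id_times feature_id) := by
  unfold Pre_change_id_times; infer_instance

def pvWitness_change_id_times : List Int := [3, 3, 7, 7, 3]

def Spec_change_id_times (feature_id : List Int) (out : List Int) : Prop :=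
  out = change_id_times_alt feature_id
instance (feature_id : List Int) (out : List Int) : Decidable (Spec_change_id_times feature_id out) := by
  unfold Spec_change_id_times; infer_instance

-- ===== CLAIM (what is proved, stated in full; the proofs are below) =====
def Claim_equal_change_id_times : Prop :=
  ∀ (feature_id : List Int), Dom_change_id_times feature_id →
    Pre_change_id_times feature_id →
    Spec_change_id_times feature_id (change_id_times feature_id)

-- ===== LEMMAS AND PROOFS =====

-- A's loop, with the current count prepended, is the prefix-sum of the change
-- flags of (prev :: rest) started at that count.
theorem change_id_times_loopA_scanl (l : List Int) :
    ∀ (prev ct : Int),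
      ct :: change_id_times_loopA l prev ct =
        List.scanl (· + ·) ct
          (((prev :: l).zip l).map (fun p => if p.2 ≠ p.1 then (1 : Int) else 0)) := by
  induction l with
  | nil => intro prev ct; simp [change_id_times_loopA, List.scanl_nil]
  | cons y ys ih =>
    intro prev ct
    by_cases h : y = prev
    · subst h
      rw [change_id_times_loopA, if_neg (by simp)]
      simp only [List.zip_cons_cons, List.map_cons, List.scanl_cons, if_neg (by simp : ¬(y ≠ y))]
      rw [← ih]
      norm_num
    · rw [change_id_times_loopA, if_pos h]
      simp only [List.zip_cons_cons, List.map_cons, List.scanl_cons, if_pos (by simpa using h)]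
      rw [← ih]

-- ===== VERDICT (by name: the statement is the Claim_ definition above) =====
theorem change_id_times_spec : Claim_equal_change_id_times := by
  intro l _ hpre
  unfold Spec_change_id_times change_id_times_alt
  match l with
  | [] => exact absurd rfl hpre
  | x :: xs =>
    show change_id_times_loopA (x :: xs) x 0 = _
    rw [change_id_times_loopA, if_neg (by simp)]
    simpa using change_id_times_loopA_scanl xs x 0
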